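-- pv_equiv track=rewrite | github.com/chsvhemanth/quantum_superdense_coding | analytics.py | classical_decode
-- ===== SOURCE A (Python) =====
-- def classical_decode(encoded: str):
--     """Decode the repetition code by majority per pair (tie -> first bit)."""
--     decoded_bits = []
--     for i in range(0, len(encoded), 2):
--         pair = encoded[i:i + 2]
--         # majority vote
--         if pair.count('1') >= 1.5:
--             decoded_bits.append('1')
--         else:
--             # if exactly 1 or zero, fallback to first bit as earlier behavior
--             decoded_bits.append('1' if pair.count('1') > 1 else pair[0])
--     return "".join(decoded_bits)
-- ===== SOURCE B (Python) =====
-- def classical_decode(encoded: str):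
--     """Decode the repetition code: A's 'majority vote' always yields the first
--     bit of each pair, so just take every even-indexed character."""
--     return encoded[::2]
-- ===== Notes on version B (the rewrite author's own statement) =====
-- stated objective: simpler
-- what changed: A's per-pair counting loop always returns the first character of each pair (count>=1.5 only when the pair is '11', else it falls back to pair[0]), so B replaces the whole loop with the slice encoded[::2].
import Mathlib
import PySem

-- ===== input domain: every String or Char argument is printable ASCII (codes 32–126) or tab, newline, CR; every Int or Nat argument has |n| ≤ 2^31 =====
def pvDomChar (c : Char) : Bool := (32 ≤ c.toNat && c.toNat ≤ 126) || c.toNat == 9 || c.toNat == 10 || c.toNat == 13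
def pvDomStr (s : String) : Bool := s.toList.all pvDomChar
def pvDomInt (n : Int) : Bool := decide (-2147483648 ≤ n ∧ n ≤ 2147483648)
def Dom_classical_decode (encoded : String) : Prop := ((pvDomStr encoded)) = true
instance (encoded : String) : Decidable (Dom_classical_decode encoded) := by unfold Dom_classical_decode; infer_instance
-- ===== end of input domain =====

-- B replaces A's per-pair counting loop (which always yields the first character of
-- each pair) by the slice encoded[::2]; objective: simpler.

-- ===== PORT A =====
def classical_decode (encoded : String) : String :=
  let decoded_bits : List String :=
    (PySem.List.pyRange 0 (PySem.Str.len encoded) 2).foldl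
      (fun acc i =>
        let pair := PySem.Str.slice encoded (some i) (some (i + 2))
        -- 'pair.count('1') >= 1.5' compares an int count with 1.5: it holds iff count ≥ 2 (exact)
        if 2 ≤ PySem.Str.count pair "1" then
          acc ++ ["1"]
        else
          -- pair[0]: pyGet? is none only on an empty pair, which the loop never produces
          acc ++ [if 1 < PySem.Str.count pair "1" then "1"
                  else ((PySem.Str.pyGet? pair 0).map (fun c => String.ofList [c])).getD ""])
      []
  PySem.Str.join "" decoded_bits

-- ===== PORT B =====
def classical_decode_alt (encoded : String) : String :=
  -- encoded[::2]; step 2 ≠ 0, so slice? is always some and the default is never used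
  (PySem.Str.slice? encoded none none 2).getD ""

-- ===== PRECONDITION & SPEC =====
def Spec_classical_decode (encoded : String) (out : String) : Prop := out = classical_decode_alt encoded
instance (encoded : String) (out : String) : Decidable (Spec_classical_decode encoded out) := by unfold Spec_classical_decode; infer_instance

-- ===== CLAIM (what is proved, stated in full; the proofs are below) =====
def Claim_equal_classical_decode : Prop := ∀ (encoded : String), Dom_classical_decode encoded → Spec_classical_decode encoded (classical_decode encoded)

-- ===== LEMMAS AND PROOFS =====

-- the element A's loop appends for the pair starting at index i
def pvElemA (encoded : String) (i : Int) : String :=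
  let pair := PySem.Str.slice encoded (some i) (some (i + 2))
  if 2 ≤ PySem.Str.count pair "1" then "1"
  else if 1 < PySem.Str.count pair "1" then "1"
  else ((PySem.Str.pyGet? pair 0).map (fun c => String.ofList [c])).getD ""

theorem pvCount_two (a b : Char) : PySem.Chars.count [a, b] ['1'] =
    (if '1' = a then if '1' = b then 2 else 1 else if '1' = b then 1 else 0) := by
  simp [PySem.Chars.count, PySem.Chars.count.go]

theorem pvCount_one (a : Char) : PySem.Chars.count [a] ['1'] = (if '1' = a then 1 else 0) := by
  simp [PySem.Chars.count, PySem.Chars.count.go]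

-- within range, A's element is exactly the first character of the pair
theorem pvElemA_toList (s : String) (k : Nat) (hk : 2 * k < s.toList.length) :
    (pvElemA s ((0 : Int) + 2 * (k : Int))).toList = [s.toList.getD (2 * k) default] := by
  have hcast : ((0 : Int) + 2 * (k : Int)) = ((2 * k : Nat) : Int) := by push_cast; ring
  have hcast2 : ((0 : Int) + 2 * (k : Int)) + 2 = ((2 * k : Nat) : Int) + ((2 : Nat) : Int) := by
    push_cast; ring
  unfold pvElemA
  rw [hcast2]
  have hsl : (PySem.Str.slice s (some ((2 * k : Nat) : Int)) (some (((2 * k : Nat) : Int) + ((2 : Nat) : Int)))).toList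
      = (s.toList.drop (2 * k)).take 2 := by
    rw [PySem.Str.toList_slice, PySem.Chars.slice_eq_listSlice, PySem.List.slice_natCast_add]
  have hdrop : s.toList.drop (2 * k) = s.toList[2 * k] :: s.toList.drop (2 * k + 1) :=
    List.drop_eq_getElem_cons hk
  have hget : s.toList.getD (2 * k) default = s.toList[2 * k] := by
    simp [List.getD_eq_getElem?_getD, List.getElem?_eq_getElem hk]
  rw [hcast]
  rcases hrest : s.toList.drop (2 * k + 1) with _ | ⟨d, rest⟩
  · have hpair : (PySem.Str.slice s (some ((2 * k : Nat) : Int)) (some (((2 * k : Nat) : Int) + ((2 : Nat) : Int)))).toList = [s.toList[2 * k]] := by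
      rw [hsl, hdrop, hrest]; rfl
    simp only [PySem.Str.count_eq, hpair]
    have h1 : ("1" : String).toList = ['1'] := rfl
    rw [h1, pvCount_one]
    split_ifs <;> simp_all
  · have hpair : (PySem.Str.slice s (some ((2 * k : Nat) : Int)) (some (((2 * k : Nat) : Int) + ((2 : Nat) : Int)))).toList = [s.toList[2 * k], d] := by
      rw [hsl, hdrop, hrest]; rfl
    simp only [PySem.Str.count_eq, hpair]
    have h1 : ("1" : String).toList = ['1'] := rfl
    rw [h1, pvCount_two]
    split_ifs <;> simp_all <;> omega

theorem classical_decode_spec : Claim_equal_classical_decode := by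
  intro s _
  unfold Spec_classical_decode classical_decode classical_decode_alt
  set cs := s.toList with hcs
  set N := cs.length with hN
  set C := (N + 1) / 2 with hC
  -- the fold body appends one element per index
  have hbody : (fun (acc : List String) (i : Int) =>
      let pair := PySem.Str.slice s (some i) (some (i + 2))
      if 2 ≤ PySem.Str.count pair "1" then acc ++ ["1"]
      else acc ++ [if 1 < PySem.Str.count pair "1" then "1"
                   else ((PySem.Str.pyGet? pair 0).map (fun c => String.ofList [c])).getD ""])
      = fun acc i => acc ++ [pvElemA s i] := by
    funext acc i
    simp only [pvElemA]
    split_ifs <;> rfl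
  have hlen : PySem.Str.len s = (N : Int) := by rw [PySem.Str.len_eq]
  have hcount : (if (0 : Int) < (N : Int) then (((N : Int) - 0 + 2 - 1) / 2).toNat else 0) = C := by
    split_ifs <;> omega
  have hrange : PySem.List.pyRange 0 (PySem.Str.len s) 2
      = (List.range C).map (fun (k : Nat) => (0 : Int) + 2 * (k : Int)) := by
    rw [hlen, PySem.List.pyRange_of_pos 0 (N : Int) (by norm_num), hcount]
  -- the loop builds the list of first characters of the pairs
  have hA : (PySem.List.pyRange 0 (PySem.Str.len s) 2).foldl
      (fun acc i =>
        let pair := PySem.Str.slice s (some i) (some (i + 2))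
        if 2 ≤ PySem.Str.count pair "1" then acc ++ ["1"]
        else acc ++ [if 1 < PySem.Str.count pair "1" then "1"
                     else ((PySem.Str.pyGet? pair 0).map (fun c => String.ofList [c])).getD ""]) []
      = (List.range C).map (fun k => String.ofList [cs.getD (2 * k) default]) := by
    rw [hbody, PySem.List.foldl_append_singleton_eq_map, hrange, List.map_map, List.nil_append]
    refine List.map_congr_left ?_
    intro k hk
    have hk' : 2 * k < N := by
      have := List.mem_range.mp hk; omega
    have := pvElemA_toList s k (by exact hk')
    simp only [Function.comp]
    calc (pvElemA s ((0 : Int) + 2 * (k : Int)))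
        = String.ofList (pvElemA s ((0 : Int) + 2 * (k : Int))).toList := by rw [String.ofList_toList]
      _ = String.ofList [cs.getD (2 * k) default] := by rw [this]
  -- the B side: the slice picks exactly those characters
  have hsi : PySem.List.sliceIndices cs.length none none 2 = (0, (cs.length : Int), 2) := by
    simp [PySem.List.sliceIndices]
  have hB : PySem.Str.slice? s none none 2
      = some (String.ofList ((List.range C).map (fun k => cs.getD (2 * k) default))) := by
    show Option.map String.ofList (PySem.Chars.slice? s.toList none none 2) = _
    rw [PySem.Chars.slice?_eq_listSlice?]
    show Option.map String.ofList (PySem.List.slice? cs none none 2) = _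
    unfold PySem.List.slice?
    rw [if_neg (by norm_num : ¬ (2 : Int) = 0), hsi]
    show Option.map String.ofList
        (some (List.filterMap (fun (k : Nat) => cs[((0 : Int) + 2 * (k : Int)).toNat]?)
          (List.range (if (0 : Int) < 2 then
            (if (0 : Int) < (cs.length : Int) then (((cs.length : Int) - 0 + 2 - 1) / 2).toNat else 0)
            else if (cs.length : Int) < 0 then (((0 : Int) - (cs.length : Int) + -2 - 1) / -2).toNat else 0)))) = _
    rw [show (if (0 : Int) < 2 then
            (if (0 : Int) < (cs.length : Int) then (((cs.length : Int) - 0 + 2 - 1) / 2).toNat else 0)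
            else if (cs.length : Int) < 0 then (((0 : Int) - (cs.length : Int) + -2 - 1) / -2).toNat else 0) = C from by
      rw [if_pos (by norm_num : (0 : Int) < 2)]; split_ifs <;> omega]
    rw [show (fun (k : Nat) => cs[((0 : Int) + 2 * (k : Int)).toNat]?)
          = fun (k : Nat) => cs[2 * k]? from by funext k; congr 1; omega]
    rw [List.filterMap_congr (g := some ∘ fun k => cs.getD (2 * k) default) ?_,
        List.filterMap_eq_map]
    · simp
    · intro k hk
      have hk' : 2 * k < cs.length := by
        have := List.mem_range.mp hk; omega
      simp [List.getElem?_eq_getElem hk', List.getD_eq_getElem?_getD]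
  rw [hA, hB]
  simp only [Option.getD_some]
  -- both are the same string: compare character lists
  have : (PySem.Str.join "" ((List.range C).map (fun k => String.ofList [cs.getD (2 * k) default]))).toList
      = (List.range C).map (fun k => cs.getD (2 * k) default) := by
    rw [PySem.Str.toList_join]
    have : ("" : String).toList = [] := rfl
    rw [this, List.map_map]
    rw [show ((fun s => String.toList s) ∘ fun k => String.ofList [cs.getD (2 * k) default])
          = (fun c => [c]) ∘ (fun k => cs.getD (2 * k) default) from by
        funext k; simp [String.toList_ofList]]
    rw [← List.map_map, PySem.Chars.join_nil_singletons]
  calc PySem.Str.join "" ((List.range C).map (fun k => String.ofList [cs.getD (2 * k) default]))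
      = String.ofList (PySem.Str.join "" ((List.range C).map (fun k => String.ofList [cs.getD (2 * k) default]))).toList := by
        rw [String.ofList_toList]
    _ = String.ofList ((List.range C).map (fun k => cs.getD (2 * k) default)) := by rw [this]
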